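-- pv_equiv track=rewrite | github.com/project-basileus/multitype-sequence-generation-by-tlstm-gan | sgtlstm/oracle.py | check_rule_3
-- ===== SOURCE A (Python) =====
-- EVENT_ENCODE = {'P': 0, 'N': 1, 'A': 2, 'B': 3, 'C': 4, 'D': 5}
--
-- def check_rule_3(seq, use_init_token=True):
--     if use_init_token:
--         seq = seq[1:]
--         # one-pass: add D to queue to be attributed to the first available C in a reversed linear scanning
--     queue = []
--     for i in range(len(seq) - 1, -1, -1):
--         if seq[i][0] == EVENT_ENCODE['D']:  # encounter a D event
--             queue.append(i)
--         elif seq[i][0] == EVENT_ENCODE['C'] and queue:  # encounter a C event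
--             queue.pop(0)
--     return len(queue) == 0
-- ===== SOURCE B (Python) =====
-- EVENT_ENCODE = {'P': 0, 'N': 1, 'A': 2, 'B': 3, 'C': 4, 'D': 5}
--
-- def check_rule_3(seq, use_init_token=True):
--     # forward scan with a running C-minus-D balance; a D with no preceding
--     # unmatched C makes the balance negative -> fail immediately
--     if use_init_token:
--         seq = seq[1:]
--     balance = 0
--     for event in seq:
--         t = event[0]
--         if t == EVENT_ENCODE['C']:
--             balance += 1
--         elif t == EVENT_ENCODE['D']:
--             balance -= 1
--             if balance < 0:
--                 return False
--     return True
-- ===== Notes on version B (the rewrite author's own statement) =====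
-- stated objective: simpler
-- what changed: Replaces A's backward scan that maintains a queue of unmatched D indices with a forward single pass keeping one integer prefix balance (C=+1, D=-1) that returns False as soon as the balance goes negative.
import Mathlib
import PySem

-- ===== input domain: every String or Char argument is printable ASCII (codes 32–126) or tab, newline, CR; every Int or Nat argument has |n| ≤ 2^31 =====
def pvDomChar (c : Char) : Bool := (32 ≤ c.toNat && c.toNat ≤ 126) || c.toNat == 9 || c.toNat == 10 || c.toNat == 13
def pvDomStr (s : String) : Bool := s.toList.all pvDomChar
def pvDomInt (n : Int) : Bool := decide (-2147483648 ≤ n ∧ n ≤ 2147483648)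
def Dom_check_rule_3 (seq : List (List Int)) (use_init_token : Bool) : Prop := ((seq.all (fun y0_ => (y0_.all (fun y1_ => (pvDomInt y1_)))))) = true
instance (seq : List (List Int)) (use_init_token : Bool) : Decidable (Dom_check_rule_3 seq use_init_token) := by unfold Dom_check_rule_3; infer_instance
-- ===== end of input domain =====

-- B replaces A's backward queue-matching scan by a forward single pass with a
-- running prefix balance and early exit (objective: simpler; same O(n) cost).


-- ===== PORT A =====
-- A's loop body: reversed index scan maintaining a queue of unmatched D indices
-- (element access is via pyGetD; inside Pre_ every accessed index is in range)
def crStep (s : List (List Int)) (queue : List Int) (i : Int) : List Int :=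
  if PySem.List.pyGetD (PySem.List.pyGetD s i []) 0 0 == 5 then
    queue ++ [i]                                   -- queue.append(i)
  else if PySem.List.pyGetD (PySem.List.pyGetD s i []) 0 0 == 4 && !queue.isEmpty then
    queue.tail                                     -- queue.pop(0)
  else
    queue

def check_rule_3 (seq : List (List Int)) (use_init_token : Bool) : Bool :=
  let s := if use_init_token then PySem.List.slice seq (some 1) none else seq
  let queue :=
    (PySem.List.pyRange ((s.length : Int) - 1) (-1) (-1)).foldl (crStep s) []
  queue.length == 0

-- ===== PORT B =====
-- forward pass keeping one integer balance; early False when it goes negative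
def crAltGo : List (List Int) → Int → Bool
  | [], _ => true
  | e :: rest, bal =>
    let t := PySem.List.pyGetD e 0 0
    if t == 4 then crAltGo rest (bal + 1)
    else if t == 5 then
      if bal - 1 < 0 then false else crAltGo rest (bal - 1)
    else crAltGo rest bal

def check_rule_3_alt (seq : List (List Int)) (use_init_token : Bool) : Bool :=
  crAltGo (if use_init_token then PySem.List.slice seq (some 1) none else seq) 0

-- ===== PRECONDITION & SPEC =====
-- Pre_ excludes exactly the inputs where A raises IndexError: an empty inner
-- event list in the scanned (post-init-slice) part of the sequence.
def Pre_check_rule_3 (seq : List (List Int)) (use_init_token : Bool) : Prop :=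
  ∀ e ∈ (if use_init_token then seq.drop 1 else seq), e ≠ []
instance (seq : List (List Int)) (use_init_token : Bool) : Decidable (Pre_check_rule_3 seq use_init_token) := by unfold Pre_check_rule_3; infer_instance

def pvWitness_check_rule_3 : List (List Int) × Bool := ([[0, 7], [4, 1], [5, 2]], true)

def Spec_check_rule_3 (seq : List (List Int)) (use_init_token : Bool) (out : Bool) : Prop := out = check_rule_3_alt seq use_init_token
instance (seq : List (List Int)) (use_init_token : Bool) (out : Bool) : Decidable (Spec_check_rule_3 seq use_init_token out) := by unfold Spec_check_rule_3; infer_instance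

-- ===== CLAIM (what is proved, stated in full; the proofs are below) =====
def Claim_equal_check_rule_3 : Prop := ∀ (seq : List (List Int)) (use_init_token : Bool), Dom_check_rule_3 seq use_init_token → Pre_check_rule_3 seq use_init_token → Spec_check_rule_3 seq use_init_token (check_rule_3 seq use_init_token)

-- ===== LEMMAS AND PROOFS =====

-- the length evolution of A's queue depends only on the event stream and the length
def crSat : List (List Int) → Nat → Nat
  | [], q => q
  | e :: r, q =>
    let t := PySem.List.pyGetD e 0 0
    crSat r (if t == 5 then q + 1 else if t == 4 && q != 0 then q - 1 else q)

-- minimal initial balance B's loop needs to succeed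
def crNeed : List (List Int) → Nat
  | [] => 0
  | e :: r =>
    let t := PySem.List.pyGetD e 0 0
    if t == 4 then crNeed r - 1 else if t == 5 then crNeed r + 1 else crNeed r

lemma crFold_len (il : List Int) (s : List (List Int)) (q : List Int) :
    (il.foldl (crStep s) q).length
      = crSat (il.map (fun i => PySem.List.pyGetD s i [])) q.length := by
  induction il generalizing q with
  | nil => simp [crSat]
  | cons i rest ih =>
    simp only [List.foldl_cons, List.map_cons, crSat]
    rw [ih]
    congr 1
    by_cases h5 : PySem.List.pyGetD (PySem.List.pyGetD s i []) 0 0 == 5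
    · simp [crStep, h5]
    · by_cases h4 : PySem.List.pyGetD (PySem.List.pyGetD s i []) 0 0 == 4
      · cases q with
        | nil => simp [crStep, h5, h4]
        | cons a as => simp [crStep, h5, h4]
      · simp [crStep, h5, h4]

lemma crRev (s : List (List Int)) :
    (List.map (fun k : Nat => ((s.length : Int) - 1 - k)) (List.range s.length)).map
        (fun i => PySem.List.pyGetD s i []) = s.reverse := by
  apply List.ext_getElem
  · simp
  · intro k h1 h2
    simp only [List.getElem_map, List.getElem_range, List.getElem_reverse]
    have hk : k < s.length := by simpa using h2
    rw [PySem.List.pyGetD_eq_getElem s [] (by omega) (by omega)]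
    congr 1
    omega

lemma crSat_append (xs : List (List Int)) (e : List Int) (q : Nat) :
    crSat (xs ++ [e]) q =
      (let t := PySem.List.pyGetD e 0 0
       if t == 5 then crSat xs q + 1
       else if t == 4 && crSat xs q != 0 then crSat xs q - 1 else crSat xs q) := by
  induction xs generalizing q with
  | nil => simp [crSat]
  | cons a r ih => simp only [List.cons_append, crSat]; rw [ih]

lemma crSat_reverse (s : List (List Int)) : crSat s.reverse 0 = crNeed s := by
  induction s with
  | nil => simp [crSat, crNeed]
  | cons e r ih =>
    rw [List.reverse_cons, crSat_append, ih]
    simp only [crNeed]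
    by_cases h5 : PySem.List.pyGetD e 0 0 == 5
    · have : ¬ (PySem.List.pyGetD e 0 0 == 4) := by
        simp only [beq_iff_eq] at *; omega
      simp [h5, this]
    · by_cases h4 : PySem.List.pyGetD e 0 0 == 4
      · simp only [h4, h5, if_true, Bool.true_and]
        by_cases hz : crNeed r = 0
        · simp [hz]
        · simp [hz]
      · simp [h4, h5]

lemma crAltGo_eq (l : List (List Int)) (bal : Int) (hb : 0 ≤ bal) :
    crAltGo l bal = decide (((crNeed l : Int)) ≤ bal) := by
  induction l generalizing bal with
  | nil =>
    simp only [crAltGo, crNeed, Nat.cast_zero]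
    exact (decide_eq_true hb).symm
  | cons e r ih =>
    simp only [crAltGo]
    by_cases h4 : PySem.List.pyGetD e 0 0 == 4
    · have hn : crNeed (e :: r) = crNeed r - 1 := by simp [crNeed, h4]
      simp only [hn]
      rw [if_pos h4, ih (bal + 1) (by omega), decide_eq_decide]
      omega
    · rw [if_neg h4]
      by_cases h5 : PySem.List.pyGetD e 0 0 == 5
      · have hn : crNeed (e :: r) = crNeed r + 1 := by simp [crNeed, h4, h5]
        simp only [hn]
        rw [if_pos h5]
        by_cases hneg : bal - 1 < 0
        · rw [if_pos hneg]
          symm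
          rw [decide_eq_false_iff_not]
          push_cast
          omega
        · rw [if_neg hneg, ih (bal - 1) (by omega), decide_eq_decide]
          omega
      · have hn : crNeed (e :: r) = crNeed r := by simp [crNeed, h4, h5]
        simp only [hn]
        rw [if_neg h5]
        exact ih bal hb

lemma nat_beq_zero_eq_decide (m : Nat) : (m == 0) = decide (((m : Int)) ≤ 0) := by
  cases m with
  | zero => simp
  | succ n => simp

-- ===== VERDICT (by name: the statement is the Claim_ definition above) =====
theorem check_rule_3_spec : Claim_equal_check_rule_3 := by
  intro seq u _ _
  unfold Spec_check_rule_3 check_rule_3 check_rule_3_alt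
  set s := if u then PySem.List.slice seq (some 1) none else seq with hs
  simp only []
  rw [PySem.List.pyRange_neg_one]
  have h1 : (((s.length : Int) - 1) - (-1)).toNat = s.length := by omega
  rw [h1, crFold_len, crRev, List.length_nil, crSat_reverse,
      crAltGo_eq s 0 (by omega), nat_beq_zero_eq_decide]
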